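-- pv_equiv track=rewrite | github.com/adamritter/lazyviewer | lazyviewer/render/__init__.py | _leading_indent_columns
-- ===== SOURCE A (Python) =====
-- def _leading_indent_columns(text: str) -> int:
--     col = 0
--     for ch in text:
--         if ch == " ":
--             col += 1
--         elif ch == "	":
--             col += 4
--         else:
--             break
--     return col
-- ===== SOURCE B (Python) =====
-- def _leading_indent_columns(text: str) -> int:
--     # Find the boundary index m of the indent run, then use the identity
--     # spaces + 4*tabs = m + 3*tabs (each of the m chars is worth at least 1).
--     m = 0
--     while m < len(text) and text[m] in " \t":
--         m += 1
--     return m + 3 * text.count("\t", 0, m)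
-- ===== Notes on version B (the rewrite author's own statement) =====
-- stated objective: alternative
-- what changed: B finds the boundary index m of the indent run by index scan and returns m + 3*tabs using the arithmetic identity spaces + 4*tabs = m + 3*tabs, instead of A's per-character weighted accumulation loop.
import Mathlib
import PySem

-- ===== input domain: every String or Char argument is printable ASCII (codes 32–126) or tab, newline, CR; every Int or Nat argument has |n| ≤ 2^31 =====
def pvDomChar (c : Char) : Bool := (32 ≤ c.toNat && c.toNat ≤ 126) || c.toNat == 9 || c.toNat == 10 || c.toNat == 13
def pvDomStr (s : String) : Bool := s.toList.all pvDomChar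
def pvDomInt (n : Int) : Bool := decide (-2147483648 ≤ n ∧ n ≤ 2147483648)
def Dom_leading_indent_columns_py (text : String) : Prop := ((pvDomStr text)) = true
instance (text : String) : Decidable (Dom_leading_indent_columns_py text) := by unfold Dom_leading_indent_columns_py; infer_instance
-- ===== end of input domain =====

-- B finds the indent-run boundary index m and returns m + 3*tabs (identity spaces + 4*tabs = m + 3*tabs), instead of A's weighted accumulating loop (alternative decomposition; same cost).


-- ===== PORT A =====
-- 'for ch in text' with break: structural recursion over the char list, accumulator col
def pvLoopA : List Char → Int → Int
  | [], col => col
  | ch :: rest, col =>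
    if ch = ' ' then pvLoopA rest (col + 1)
    else if ch = '\t' then pvLoopA rest (col + 4)
    else col

def leading_indent_columns_py (text : String) : Int := pvLoopA text.toList 0

-- ===== PORT B =====
-- B's while loop 'while m < len(text) and text[m] in " \t": m += 1' as index recursion
def pvIdxB : List Char → Nat
  | [] => 0
  | ch :: rest => if ch = ' ' ∨ ch = '\t' then pvIdxB rest + 1 else 0

-- text.count("\t", 0, m) = count of '\t' among the first m characters (exact on this range)
def leading_indent_columns_py_alt (text : String) : Int :=
  let m := pvIdxB text.toList
  (m : Int) + 3 * ((text.toList.take m).count '\t' : Int)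

-- ===== PRECONDITION & SPEC =====
def Spec_leading_indent_columns_py (text : String) (out : Int) : Prop := out = leading_indent_columns_py_alt text
instance (text : String) (out : Int) : Decidable (Spec_leading_indent_columns_py text out) := by unfold Spec_leading_indent_columns_py; infer_instance

-- ===== CLAIM (what is proved, stated in full; the proofs are below) =====
def Claim_equal_leading_indent_columns_py : Prop := ∀ (text : String), Dom_leading_indent_columns_py text → Spec_leading_indent_columns_py text (leading_indent_columns_py text)

-- ===== LEMMAS AND PROOFS =====
theorem pvLoopA_eq (l : List Char) (col : Int) :
    pvLoopA l col = col + (pvIdxB l : Int) + 3 * (((l.take (pvIdxB l)).count '\t' : Nat) : Int) := by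
  induction l generalizing col with
  | nil => simp [pvLoopA, pvIdxB]
  | cons ch rest ih =>
    by_cases hs : ch = ' '
    · simp [pvLoopA, pvIdxB, hs, ih]; ring
    · by_cases ht : ch = '\t'
      · simp [pvLoopA, pvIdxB, hs, ht, ih]; ring
      · simp [pvLoopA, pvIdxB, hs, ht]

-- ===== VERDICT =====
theorem leading_indent_columns_py_spec : Claim_equal_leading_indent_columns_py := by
  intro text _
  unfold Spec_leading_indent_columns_py leading_indent_columns_py leading_indent_columns_py_alt
  simp [pvLoopA_eq]
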